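-- pv_equiv track=rewrite | github.com/ums-1994/Lukens | risk_gate/risk_engine/ai_writer_helper.py | _create_action_plan
-- ===== SOURCE A (Python) =====
-- from typing import List, Dict, Any, Optional
--
-- def _create_action_plan(fixes: Dict[str, List[Dict[str, Any]]], issues: List[Dict[str, Any]]) -> str:
--     """Create an action plan for implementing fixes"""
--     action_steps = []
--
--     step_number = 1
--
--     # Missing sections
--     if fixes.get('missing_sections'):
--         action_steps.append(f"{step_number}. Add missing sections: {', '.join([fix['section_name'] for fix in fixes['missing_sections']])}")
--         step_number += 1
--
--     # Weak areas
--     if fixes.get('weak_areas'):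
--         action_steps.append(f"{step_number}. Improve weak areas: {', '.join([fix['area_name'] for fix in fixes['weak_areas']])}")
--         step_number += 1
--
--     # Incorrect clauses
--     if fixes.get('incorrect_clauses'):
--         action_steps.append(f"{step_number}. Correct clauses: {', '.join([fix['clause_name'] for fix in fixes['incorrect_clauses']])}")
--         step_number += 1
--
--     # Review step
--     action_steps.append(f"{step_number}. Review all generated content for accuracy and completeness")
--     step_number += 1
--
--     # Final step
--     action_steps.append(f"{step_number}. Re-run risk assessment to verify all issues are resolved")
--
--     return " | ".join(action_steps)
-- ===== SOURCE B (Python) =====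
-- def _create_action_plan(fixes, issues):
--     """Create an action plan for implementing fixes"""
--     def render(specs, n):
--         if not specs:
--             return (f"{n}. Review all generated content for accuracy and completeness"
--                     f" | {n + 1}. Re-run risk assessment to verify all issues are resolved")
--         (key, field, prefix), rest = specs[0], specs[1:]
--         items = fixes.get(key)
--         if not items:
--             return render(rest, n)
--         names = items[0][field]
--         for fx in items[1:]:
--             names += ", " + fx[field]
--         return f"{n}. {prefix}: {names} | " + render(rest, n + 1)
--     return render([('missing_sections', 'section_name', 'Add missing sections'),
--                    ('weak_areas', 'area_name', 'Improve weak areas'),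
--                    ('incorrect_clauses', 'clause_name', 'Correct clauses')], 1)
-- ===== Notes on version B (the rewrite author's own statement) =====
-- stated objective: alternative
-- what changed: Replaces the unrolled if-blocks that stage a list of numbered steps and join it by a single recursive descent over a spec table that threads the step number and concatenates the final string directly (no intermediate step list, no join), accumulating each section's names by string concatenation instead of ', '.join.
import Mathlib
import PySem

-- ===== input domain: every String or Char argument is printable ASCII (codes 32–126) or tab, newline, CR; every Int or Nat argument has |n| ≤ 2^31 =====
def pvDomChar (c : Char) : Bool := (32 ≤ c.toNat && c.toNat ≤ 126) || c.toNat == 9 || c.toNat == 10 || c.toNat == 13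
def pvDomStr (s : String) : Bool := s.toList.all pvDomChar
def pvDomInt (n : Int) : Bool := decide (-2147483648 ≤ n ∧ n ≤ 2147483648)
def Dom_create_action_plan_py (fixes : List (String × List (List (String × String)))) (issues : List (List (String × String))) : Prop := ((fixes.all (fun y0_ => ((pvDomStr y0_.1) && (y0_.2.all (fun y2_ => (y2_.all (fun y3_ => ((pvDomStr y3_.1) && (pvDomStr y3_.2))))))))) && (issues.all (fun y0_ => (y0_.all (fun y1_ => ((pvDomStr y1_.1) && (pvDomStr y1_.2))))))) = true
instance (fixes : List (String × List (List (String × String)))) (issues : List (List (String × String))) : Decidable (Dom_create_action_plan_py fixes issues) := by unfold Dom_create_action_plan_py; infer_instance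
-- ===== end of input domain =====

-- B replaces A's staged list of numbered steps + " | ".join by one recursive descent over a
-- spec table that threads the step number and concatenates the output string directly (alternative decomposition).

-- fixes.get(key) / fixes[key] after a truthiness check on the same key
def pvGetKey (fixes : List (String × List (List (String × String)))) (k : String) : List (List (String × String)) :=
  ((PySem.Dict.mk fixes).get? k).getD []

-- fix[field]: Pre_ guarantees the key is present, so getD's default is never used
def pvField (fx : List (String × String)) (field : String) : String :=
  (PySem.Dict.mk fx).getD field ""

-- ===== PORT A =====
def create_action_plan_py (fixes : List (String × List (List (String × String)))) (issues : List (List (String × String))) : String :=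
  let action_steps : List String := []
  let step_number : Int := 1
  let (action_steps, step_number) :=
    if pvGetKey fixes "missing_sections" ≠ [] then
      (action_steps ++ [PySem.Int.toStr step_number ++ ". Add missing sections: " ++
        PySem.Str.join ", " ((pvGetKey fixes "missing_sections").map (fun fx => pvField fx "section_name"))],
       step_number + 1)
    else (action_steps, step_number)
  let (action_steps, step_number) :=
    if pvGetKey fixes "weak_areas" ≠ [] then
      (action_steps ++ [PySem.Int.toStr step_number ++ ". Improve weak areas: " ++
        PySem.Str.join ", " ((pvGetKey fixes "weak_areas").map (fun fx => pvField fx "area_name"))],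
       step_number + 1)
    else (action_steps, step_number)
  let (action_steps, step_number) :=
    if pvGetKey fixes "incorrect_clauses" ≠ [] then
      (action_steps ++ [PySem.Int.toStr step_number ++ ". Correct clauses: " ++
        PySem.Str.join ", " ((pvGetKey fixes "incorrect_clauses").map (fun fx => pvField fx "clause_name"))],
       step_number + 1)
    else (action_steps, step_number)
  let action_steps := action_steps ++ [PySem.Int.toStr step_number ++ ". Review all generated content for accuracy and completeness"]
  let step_number := step_number + 1
  let action_steps := action_steps ++ [PySem.Int.toStr step_number ++ ". Re-run risk assessment to verify all issues are resolved"]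
  PySem.Str.join " | " action_steps

-- ===== PORT B =====
-- 'names = items[0][field]; for fx in items[1:]: names += ", " + fx[field]'
def pvNames (items : List (List (String × String))) (field : String) : String :=
  match items with
  | [] => ""   -- never reached: render only calls pvNames on non-empty items
  | hd :: tl => tl.foldl (fun acc fx => acc ++ ", " ++ pvField fx field) (pvField hd field)

-- the inner recursive 'render(specs, n)' of B
def pvRender (fixes : List (String × List (List (String × String)))) :
    List (String × String × String) → Int → String
  | [], n =>
      PySem.Int.toStr n ++ ". Review all generated content for accuracy and completeness | " ++
      PySem.Int.toStr (n + 1) ++ ". Re-run risk assessment to verify all issues are resolved"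
  | (key, field, prefx) :: rest, n =>
      let items := pvGetKey fixes key
      if items.isEmpty then pvRender fixes rest n
      else
        PySem.Int.toStr n ++ ". " ++ prefx ++ ": " ++ pvNames items field ++ " | " ++
        pvRender fixes rest (n + 1)

def create_action_plan_py_alt (fixes : List (String × List (List (String × String)))) (issues : List (List (String × String))) : String :=
  pvRender fixes
    [("missing_sections", "section_name", "Add missing sections"),
     ("weak_areas", "area_name", "Improve weak areas"),
     ("incorrect_clauses", "clause_name", "Correct clauses")] 1

-- ===== PRECONDITION & SPEC =====
-- Pre_ excludes inputs where some fix dict in a selected section lacks its name field,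
-- on which Python A raises KeyError.
def Pre_create_action_plan_py (fixes : List (String × List (List (String × String)))) (issues : List (List (String × String))) : Prop :=
  (∀ fx ∈ pvGetKey fixes "missing_sections", (PySem.Dict.mk fx).contains "section_name" = true) ∧
  (∀ fx ∈ pvGetKey fixes "weak_areas", (PySem.Dict.mk fx).contains "area_name" = true) ∧
  (∀ fx ∈ pvGetKey fixes "incorrect_clauses", (PySem.Dict.mk fx).contains "clause_name" = true)
instance (fixes : List (String × List (List (String × String)))) (issues : List (List (String × String))) : Decidable (Pre_create_action_plan_py fixes issues) := by unfold Pre_create_action_plan_py; infer_instance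
def pvWitness_create_action_plan_py : (List (String × List (List (String × String)))) × (List (List (String × String))) :=
  ([("missing_sections", [[("section_name", "Scope")]])], [])

def Spec_create_action_plan_py (fixes : List (String × List (List (String × String)))) (issues : List (List (String × String))) (out : String) : Prop := out = create_action_plan_py_alt fixes issues
instance (fixes : List (String × List (List (String × String)))) (issues : List (List (String × String))) (out : String) : Decidable (Spec_create_action_plan_py fixes issues out) := by unfold Spec_create_action_plan_py; infer_instance

-- ===== CLAIM =====
def Claim_equal_create_action_plan_py : Prop := ∀ (fixes : List (String × List (List (String × String)))) (issues : List (List (String × String))), Dom_create_action_plan_py fixes issues → Pre_create_action_plan_py fixes issues → Spec_create_action_plan_py fixes issues (create_action_plan_py fixes issues)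

-- ===== LEMMAS AND PROOFS =====
theorem str_join_singleton (sep a : String) : PySem.Str.join sep [a] = a := by
  simp [PySem.Str.join, PySem.Chars.join_singleton]

theorem str_join_cons (sep a b : String) (l : List String) :
    PySem.Str.join sep (a :: b :: l) = a ++ sep ++ PySem.Str.join sep (b :: l) := by
  simp [PySem.Str.join, PySem.Chars.join_cons_cons, String.append_assoc]

-- the suffix of the name list after the first element, as B accumulates it
def pvTail (field : String) : List (List (String × String)) → String
  | [] => ""
  | fx :: t => ", " ++ pvField fx field ++ pvTail field t

theorem foldl_names (field : String) (l : List (List (String × String))) (init : String) :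
    l.foldl (fun acc fx => acc ++ ", " ++ pvField fx field) init = init ++ pvTail field l := by
  induction l generalizing init with
  | nil => simp [pvTail]
  | cons b t ih => rw [List.foldl_cons, ih]; simp [pvTail, String.append_assoc]

theorem join_eq_tail (field : String) (hd : List (String × String))
    (tl : List (List (String × String))) :
    PySem.Str.join ", " ((hd :: tl).map (fun fx => pvField fx field))
      = pvField hd field ++ pvTail field tl := by
  induction tl generalizing hd with
  | nil => simp [pvTail, str_join_singleton]
  | cons b t ih =>
    rw [List.map_cons, List.map_cons, str_join_cons,
      show pvField b field :: List.map (fun fx => pvField fx field) t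
         = List.map (fun fx => pvField fx field) (b :: t) from rfl, ih]
    simp [pvTail, String.append_assoc]

theorem join_comma_eq_pvNames (items : List (List (String × String))) (field : String)
    (h : items ≠ []) :
    PySem.Str.join ", " (items.map (fun fx => pvField fx field)) = pvNames items field := by
  cases items with
  | nil => simp at h
  | cons hd tl => rw [join_eq_tail]; simp only [pvNames]; rw [foldl_names]

-- ===== VERDICT =====
theorem create_action_plan_py_spec : Claim_equal_create_action_plan_py := by
  intro fixes issues _ _
  unfold Spec_create_action_plan_py create_action_plan_py create_action_plan_py_alt
  by_cases h1 : pvGetKey fixes "missing_sections" = [] <;>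
  by_cases h2 : pvGetKey fixes "weak_areas" = [] <;>
  by_cases h3 : pvGetKey fixes "incorrect_clauses" = [] <;>
    simp [h1, h2, h3, pvRender, str_join_cons, str_join_singleton,
      join_comma_eq_pvNames, List.isEmpty_iff, String.append_assoc]
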